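-- pv_equiv track=rewrite | github.com/DemianGo/laravel-rag-vertex-full | scripts/rag_search/mode_detector.py | has_summary_intent
-- ===== SOURCE A (Python) =====
-- def has_summary_intent(query: str) -> bool:
--     """Detecta intent de resumo"""
--     hints = [
--         'resumo', 'resuma', 'resumir', 'sumário', 'executivo',
--         'em linhas', 'síntese', 'sintese'
--     ]
--
--     for hint in hints:
--         if hint in query:
--             return True
--
--     return False
-- ===== SOURCE B (Python) =====
-- HINTS = (
--     'resumo', 'resuma', 'resumir', 'sumário', 'executivo',
--     'em linhas', 'síntese', 'sintese'
-- )
--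
-- def has_summary_intent(query: str) -> bool:
--     """Detecta intent de resumo: percorre os sufixos da consulta e
--     verifica se algum deles começa com uma das palavras-chave."""
--     suffix = query
--     while suffix:
--         if any(suffix.startswith(hint) for hint in HINTS):
--             return True
--         suffix = suffix[1:]
--     return False
-- ===== Notes on version B (the rewrite author's own statement) =====
-- stated objective: alternative
-- what changed: Instead of A's eight independent substring scans ('hint in query' per hint), B makes one walk over the suffixes of the query, testing at each suffix whether any hint is its prefix.
import Mathlib
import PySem

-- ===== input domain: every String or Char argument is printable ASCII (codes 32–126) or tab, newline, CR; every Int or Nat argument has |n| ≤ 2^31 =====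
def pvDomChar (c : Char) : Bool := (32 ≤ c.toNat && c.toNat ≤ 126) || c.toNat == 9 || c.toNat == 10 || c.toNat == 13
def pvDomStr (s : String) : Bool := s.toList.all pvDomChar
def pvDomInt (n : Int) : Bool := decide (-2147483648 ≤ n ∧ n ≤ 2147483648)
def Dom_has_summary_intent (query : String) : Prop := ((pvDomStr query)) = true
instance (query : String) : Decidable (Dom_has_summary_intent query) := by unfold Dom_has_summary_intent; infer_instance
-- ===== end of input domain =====

-- B replaces A's per-hint substring scans with one walk over the suffixes of the query,
-- testing each hint as a prefix there (alternative decomposition, same cost).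

-- ===== PORT A =====
-- 'for hint in hints: if hint in query: return True' = List.any over hints; 'hint in query' = PySem.Str.isIn
def has_summary_intent (query : String) : Bool :=
  let hints : List String := ["resumo", "resuma", "resumir", "sumário", "executivo",
                              "em linhas", "síntese", "sintese"]
  hints.any (fun hint => PySem.Str.isIn hint query)

-- ===== PORT B =====
def pvHintsB : List String := ["resumo", "resuma", "resumir", "sumário", "executivo",
                               "em linhas", "síntese", "sintese"]
-- the 'while suffix: … suffix = suffix[1:]' loop = structural recursion on the suffix (as List Char);
-- 'suffix.startswith(hint)' = PySem.Chars.startswith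
def pvSuffixScan : List Char → Bool
  | [] => false
  | c :: t =>
      if pvHintsB.any (fun hint => PySem.Chars.startswith (c :: t) hint.toList) then true
      else pvSuffixScan t

def has_summary_intent_alt (query : String) : Bool :=
  pvSuffixScan query.toList

-- ===== PRECONDITION & SPEC =====
def Spec_has_summary_intent (query : String) (out : Bool) : Prop := out = has_summary_intent_alt query
instance (query : String) (out : Bool) : Decidable (Spec_has_summary_intent query out) := by unfold Spec_has_summary_intent; infer_instance

-- ===== CLAIM (what is proved, stated in full; the proofs are below) =====
def Claim_equal_has_summary_intent : Prop := ∀ (query : String), Dom_has_summary_intent query → Spec_has_summary_intent query (has_summary_intent query)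

-- ===== LEMMAS AND PROOFS =====
-- the suffix scan finds exactly the hints occurring as an infix of the scanned list
theorem pvSuffixScan_iff (l : List Char) :
    pvSuffixScan l = true ↔ ∃ h ∈ pvHintsB, h.toList <:+: l := by
  induction l with
  | nil =>
      refine iff_of_false (by simp [pvSuffixScan]) ?_
      rintro ⟨h, hmem, hinf⟩
      have : h.toList = [] := List.eq_nil_of_infix_nil hinf
      fin_cases hmem <;> simp_all
  | cons c t ih =>
      simp only [pvSuffixScan]
      split_ifs with hpre
      · simp only [true_iff]
        simp only [List.any_eq_true] at hpre
        obtain ⟨h, hmem, hs⟩ := hpre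
        exact ⟨h, hmem, ((PySem.Chars.startswith_iff _ _).mp hs).isInfix⟩
      · rw [ih]
        simp only [List.any_eq_true] at hpre
        push Not at hpre
        constructor
        · rintro ⟨h, hmem, hinf⟩; exact ⟨h, hmem, List.infix_cons hinf⟩
        · rintro ⟨h, hmem, hinf⟩
          rcases List.infix_cons_iff.mp hinf with hp | hi
          · exact absurd ((PySem.Chars.startswith_iff _ _).mpr hp)
              (by simpa using hpre h hmem)
          · exact ⟨h, hmem, hi⟩

-- ===== VERDICT (by name: the statement is the Claim_ definition above) =====
theorem has_summary_intent_spec : Claim_equal_has_summary_intent := by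
  intro query _
  unfold Spec_has_summary_intent has_summary_intent has_summary_intent_alt
  rw [Bool.eq_iff_iff, pvSuffixScan_iff]
  simp only [List.any_eq_true, PySem.Str.isIn_iff_infix]
  constructor
  · rintro ⟨h, hmem, hinf⟩
    refine ⟨h, ?_, hinf⟩
    fin_cases hmem <;> simp [pvHintsB]
  · rintro ⟨h, hmem, hinf⟩
    refine ⟨h, ?_, hinf⟩
    fin_cases hmem <;> simp
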